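-- pv_equiv track=rewrite | github.com/arushigupta596/Renew_OCR | excel/writer.py | _dedup_per_vehicle_list
-- ===== SOURCE A (Python) =====
-- def _dedup_per_vehicle_list(per_vehicle: list[dict]) -> list[dict]:
--     """Final safety-net merge by BoE/vehicle before writing to Excel."""
--
--     def _is_blank(value) -> bool:
--         return str(value).strip().upper() in ("", "NONE", "N/A", "NULL")
--
--     def _find_boe(row: dict) -> str | None:
--         for key, value in row.items():
--             key_lower = str(key).lower()
--             if "boe" in key_lower or "bill of entry" in key_lower or "be number" in key_lower:
--                 if not _is_blank(value):
--                     return str(value).strip().upper()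
--         return None
--
--     def _find_vehicle(row: dict) -> str | None:
--         for key, value in row.items():
--             if "vehicle" in str(key).lower() and not _is_blank(value):
--                 return str(value).strip().upper()
--         return None
--
--     def _find_invoice(row: dict) -> str | None:
--         for key, value in row.items():
--             if "invoice" in str(key).lower() and not _is_blank(value):
--                 return str(value).strip().upper()
--         return None
--
--     def _merge_rows(base: dict, incoming: dict) -> dict:
--         merged_row = dict(base)
--         for key, value in incoming.items():
--             if key.startswith("_") or _is_blank(value):
--                 continue
--             if key not in merged_row or _is_blank(merged_row[key]):
--                 merged_row[key] = value
--         return merged_row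
--
--     keyed: dict[str, dict] = {}
--     seen_hashes: set[str] = set()
--     unique: list[dict] = []
--
--     for row in per_vehicle:
--         boe = _find_boe(row)
--         vehicle = _find_vehicle(row)
--         invoice = _find_invoice(row)
--
--         key = None
--         if boe:
--             key = f"boe::{boe}"
--         elif vehicle and invoice:
--             key = f"vehicle_invoice::{vehicle}||{invoice}"
--         elif vehicle:
--             key = f"vehicle::{vehicle}"
--
--         if key:
--             if key in keyed:
--                 keyed[key] = _merge_rows(keyed[key], row)
--             else:
--                 keyed[key] = dict(row)
--             continue
--
--         h = "|".join(
--             f"{k}={str(row[k]).strip().upper()}" for k in sorted(row.keys())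
--             if not _is_blank(row[k])
--         )
--         if h in seen_hashes:
--             continue
--         seen_hashes.add(h)
--         unique.append(dict(row))
--
--     unique.extend(keyed.values())
--     return unique
-- ===== SOURCE B (Python) =====
-- # B: no hash maps or hash sets -- key-directed take-first-and-filter recursion:
-- # split rows into keyless and keyed; dedup keyless rows nub-style (keep the first,
-- # drop every later row with the same hash, recurse); merge keyed rows by taking the
-- # first row, folding its whole group over the rest, and recursing on the complement.
--
-- def _b_is_blank(value) -> bool:
--     return str(value).strip().upper() in ("", "NONE", "N/A", "NULL")
--
--
-- def _b_find(row: dict, key_pred) -> str | None: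
--     for key, value in row.items():
--         if key_pred(str(key).lower()) and not _b_is_blank(value):
--             return str(value).strip().upper()
--     return None
--
--
-- def _b_key(row: dict) -> str | None:
--     boe = _b_find(row, lambda k: "boe" in k or "bill of entry" in k or "be number" in k)
--     if boe:
--         return f"boe::{boe}"
--     vehicle = _b_find(row, lambda k: "vehicle" in k)
--     invoice = _b_find(row, lambda k: "invoice" in k)
--     if vehicle and invoice:
--         return f"vehicle_invoice::{vehicle}||{invoice}"
--     if vehicle:
--         return f"vehicle::{vehicle}"
--     return None
--
--
-- def _b_hash(row: dict) -> str:
--     return "|".join(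
--         f"{k}={str(row[k]).strip().upper()}" for k in sorted(row.keys())
--         if not _b_is_blank(row[k])
--     )
--
--
-- def _b_merge(base: dict, incoming: dict) -> dict:
--     merged_row = dict(base)
--     for key, value in incoming.items():
--         if key.startswith("_") or _b_is_blank(value):
--             continue
--         if key not in merged_row or _b_is_blank(merged_row[key]):
--             merged_row[key] = value
--     return merged_row
--
--
-- def _uniq_by_hash(rows: list[dict]) -> list[dict]:
--     if not rows:
--         return []
--     first, rest = rows[0], rows[1:]
--     h0 = _b_hash(first)
--     return [dict(first)] + _uniq_by_hash([r for r in rest if _b_hash(r) != h0])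
--
--
-- def _merge_groups(rows: list[dict]) -> list[dict]:
--     if not rows:
--         return []
--     first, rest = rows[0], rows[1:]
--     k0 = _b_key(first)
--     acc = dict(first)
--     for r in rest:
--         if _b_key(r) == k0:
--             acc = _b_merge(acc, r)
--     return [acc] + _merge_groups([r for r in rest if _b_key(r) != k0])
--
--
-- def _dedup_per_vehicle_list(per_vehicle: list[dict]) -> list[dict]:
--     keyless = [r for r in per_vehicle if _b_key(r) is None]
--     keyed = [r for r in per_vehicle if _b_key(r) is not None]
--     return _uniq_by_hash(keyless) + _merge_groups(keyed)
-- ===== Notes on version B (the rewrite author's own statement) =====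
-- stated objective: alternative
-- what changed: Replaces A's single-pass hash-map/hash-set state machine (keyed dict merged in place plus a seen-hash set and append list) with a data-structure-free take-first-and-filter recursion: rows are partitioned into keyless and keyed, keyless rows are deduped nub-style (keep first, filter out later rows with the same hash, recurse) and keyed rows are merged by taking the first row, folding its whole group gathered from the rest, and recursing on the filtered complement.
import Mathlib
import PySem

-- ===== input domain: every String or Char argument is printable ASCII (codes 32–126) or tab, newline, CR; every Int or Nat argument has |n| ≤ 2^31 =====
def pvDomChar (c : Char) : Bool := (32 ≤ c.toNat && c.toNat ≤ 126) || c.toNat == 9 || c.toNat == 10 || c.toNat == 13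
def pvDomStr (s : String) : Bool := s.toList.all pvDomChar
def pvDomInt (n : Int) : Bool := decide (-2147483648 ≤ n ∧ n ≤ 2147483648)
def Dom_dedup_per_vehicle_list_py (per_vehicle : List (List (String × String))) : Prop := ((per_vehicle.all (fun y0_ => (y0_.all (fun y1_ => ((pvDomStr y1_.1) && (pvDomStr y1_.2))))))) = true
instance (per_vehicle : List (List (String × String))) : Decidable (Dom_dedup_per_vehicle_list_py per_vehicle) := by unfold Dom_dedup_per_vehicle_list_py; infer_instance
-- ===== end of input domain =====

-- B drops A's hash-map/hash-set state machine: it partitions rows into keyless and keyed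
-- and processes each part by take-first-and-filter recursion (nub-style dedup of keyless
-- rows by hash; per-group merge of keyed rows gathered by filtering, recursing on the
-- complement). Same blank/key/merge rules; return value only. Objective: alternative.

-- ===== PORT A =====
-- shared helpers: A's inner helpers (_is_blank, the key finders, _merge_rows, the keyless
-- hash); Source B keeps the same rules for them, so both ports cite these definitions.

-- str(value).strip().upper() in ("", "NONE", "N/A", "NULL")
def pvIsBlank (v : String) : Bool :=
  let s := PySem.Str.upper (PySem.Str.strip v)
  s == "" || s == "NONE" || s == "N/A" || s == "NULL"

-- the early-return scan shared by _find_boe/_find_vehicle/_find_invoice (predicate on the lowered key)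
def pvFindBy (p : String → Bool) : List (String × String) → Option String
  | [] => none
  | (k, v) :: rest =>
      if p (PySem.Str.lower k) && !pvIsBlank v then
        some (PySem.Str.upper (PySem.Str.strip v))
      else pvFindBy p rest

def pvBoePred (kl : String) : Bool :=
  PySem.Str.isIn "boe" kl || PySem.Str.isIn "bill of entry" kl || PySem.Str.isIn "be number" kl

-- boe/vehicle/invoice and the if/elif chain building the group key (none = keyless row)
def pvRowKey (row : PySem.Dict String String) : Option String :=
  let boe := pvFindBy pvBoePred row.items
  let vehicle := pvFindBy (fun kl => PySem.Str.isIn "vehicle" kl) row.items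
  let invoice := pvFindBy (fun kl => PySem.Str.isIn "invoice" kl) row.items
  match boe with
  | some b => some ("boe::" ++ b)
  | none =>
    match vehicle, invoice with
    | some v, some i => some ("vehicle_invoice::" ++ v ++ "||" ++ i)
    | some v, none => some ("vehicle::" ++ v)
    | none, _ => none

-- "|".join(f"{k}={str(row[k]).strip().upper()}" for k in sorted(row.keys()) if not _is_blank(row[k]))
def pvRowHash (row : PySem.Dict String String) : String :=
  PySem.Str.join "|"
    (((PySem.List.sorted row.keys (fun k => k)).filter
        (fun k => !pvIsBlank (row.getD k ""))).map
      (fun k => k ++ "=" ++ PySem.Str.upper (PySem.Str.strip (row.getD k ""))))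

-- _merge_rows
def pvMergeRows (base incoming : PySem.Dict String String) : PySem.Dict String String :=
  incoming.items.foldl
    (fun m kv =>
      if PySem.Str.startswith kv.1 "_" || pvIsBlank kv.2 then m
      else if !m.contains kv.1 || pvIsBlank (m.getD kv.1 "") then m.insert kv.1 kv.2
      else m)
    base

-- A's single pass: keyed dict merged incrementally, plus hash-set dedup of keyless rows
def pvStepA
    (st : PySem.Dict String (PySem.Dict String String) × PySem.Set String × List (PySem.Dict String String))
    (rowL : List (String × String)) :
    PySem.Dict String (PySem.Dict String String) × PySem.Set String × List (PySem.Dict String String) :=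
  let row := PySem.Dict.ofList rowL
  match pvRowKey row with
  | some key =>
      match st.1.get? key with
      | some prev => (st.1.insert key (pvMergeRows prev row), st.2.1, st.2.2)
      | none => (st.1.insert key row, st.2.1, st.2.2)
  | none =>
      let h := pvRowHash row
      if PySem.Set.contains st.2.1 h then st
      else (st.1, PySem.Set.add st.2.1 h, st.2.2 ++ [row])

-- unique.extend(keyed.values()); return unique  (rows back to plain item lists)
def pvFinishA
    (st : PySem.Dict String (PySem.Dict String String) × PySem.Set String × List (PySem.Dict String String)) :
    List (List (String × String)) :=
  (st.2.2 ++ st.1.values).map PySem.Dict.items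

def dedup_per_vehicle_list_py (per_vehicle : List (List (String × String))) : List (List (String × String)) :=
  pvFinishA (per_vehicle.foldl pvStepA (PySem.Dict.empty, PySem.Set.empty, []))

-- ===== PORT B =====
-- _uniq_by_hash: keep the first row, drop every later row with the same hash, recurse
def pvUniqByHash : List (PySem.Dict String String) → List (PySem.Dict String String)
  | [] => []
  | first :: rest =>
      first :: pvUniqByHash (rest.filter (fun r => pvRowHash r != pvRowHash first))
termination_by rows => rows.length
decreasing_by
  simpa using Nat.lt_succ_of_le (List.length_filter_le _ _)

-- _merge_groups: fold the first row's whole group over the rest, recurse on the complement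
def pvMergeGroups : List (PySem.Dict String String) → List (PySem.Dict String String)
  | [] => []
  | first :: rest =>
      (rest.foldl (fun acc r => if pvRowKey r == pvRowKey first then pvMergeRows acc r else acc) first)
        :: pvMergeGroups (rest.filter (fun r => pvRowKey r != pvRowKey first))
termination_by rows => rows.length
decreasing_by
  simpa using Nat.lt_succ_of_le (List.length_filter_le _ _)

-- keyless/keyed partition, then the two recursions (rows back to plain item lists)
def dedup_per_vehicle_list_py_alt (per_vehicle : List (List (String × String))) : List (List (String × String)) :=
  let rows := per_vehicle.map PySem.Dict.ofList
  let keyless := rows.filter (fun r => (pvRowKey r).isNone)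
  let keyed := rows.filter (fun r => (pvRowKey r).isSome)
  (pvUniqByHash keyless ++ pvMergeGroups keyed).map PySem.Dict.items

-- ===== PRECONDITION & SPEC =====
def Spec_dedup_per_vehicle_list_py (per_vehicle : List (List (String × String))) (out : List (List (String × String))) : Prop := out = dedup_per_vehicle_list_py_alt per_vehicle
instance (per_vehicle : List (List (String × String))) (out : List (List (String × String))) : Decidable (Spec_dedup_per_vehicle_list_py per_vehicle out) := by unfold Spec_dedup_per_vehicle_list_py; infer_instance

-- ===== CLAIM (what is proved, stated in full; the proofs are below) =====
def Claim_equal_dedup_per_vehicle_list_py : Prop := ∀ (per_vehicle : List (List (String × String))), Dom_dedup_per_vehicle_list_py per_vehicle → Spec_dedup_per_vehicle_list_py per_vehicle (dedup_per_vehicle_list_py per_vehicle)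

-- ===== LEMMAS AND PROOFS =====

-- A's step on an already-converted dict row, and its two independent halves
def pvStepA' (st : PySem.Dict String (PySem.Dict String String) × PySem.Set String × List (PySem.Dict String String))
    (row : PySem.Dict String String) :
    PySem.Dict String (PySem.Dict String String) × PySem.Set String × List (PySem.Dict String String) :=
  match pvRowKey row with
  | some key =>
      match st.1.get? key with
      | some prev => (st.1.insert key (pvMergeRows prev row), st.2.1, st.2.2)
      | none => (st.1.insert key row, st.2.1, st.2.2)
  | none =>
      let h := pvRowHash row
      if PySem.Set.contains st.2.1 h then st
      else (st.1, PySem.Set.add st.2.1 h, st.2.2 ++ [row])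

-- A's keyed-dict half
def pvStepK (d : PySem.Dict String (PySem.Dict String String)) (row : PySem.Dict String String) :
    PySem.Dict String (PySem.Dict String String) :=
  match pvRowKey row with
  | some key =>
      match d.get? key with
      | some prev => d.insert key (pvMergeRows prev row)
      | none => d.insert key row
  | none => d

-- A's keyless half
def pvStepU (su : PySem.Set String × List (PySem.Dict String String)) (row : PySem.Dict String String) :
    PySem.Set String × List (PySem.Dict String String) :=
  match pvRowKey row with
  | some _ => su
  | none =>
      let h := pvRowHash row
      if PySem.Set.contains su.1 h then su else (PySem.Set.add su.1 h, su.2 ++ [row])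

theorem pvFoldA_map (l : List (List (String × String))) (st : _) :
    l.foldl pvStepA st = (l.map PySem.Dict.ofList).foldl pvStepA' st := by
  rw [List.foldl_map]
  rfl

theorem pvFoldA_split (rs : List (PySem.Dict String String))
    (d : PySem.Dict String (PySem.Dict String String)) (s : PySem.Set String)
    (u : List (PySem.Dict String String)) :
    rs.foldl pvStepA' (d, s, u) = (rs.foldl pvStepK d, rs.foldl pvStepU (s, u)) := by
  induction rs generalizing d s u with
  | nil => rfl
  | cons r rs ih =>
    have hstep : pvStepA' (d, s, u) r = (pvStepK d r, pvStepU (s, u) r) := by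
      unfold pvStepA' pvStepK pvStepU
      dsimp only
      cases pvRowKey r with
      | some k =>
        dsimp only
        cases d.get? k <;> rfl
      | none =>
        dsimp only
        split <;> rfl
    rcases h2 : pvStepU (s, u) r with ⟨s', u'⟩
    rw [List.foldl_cons, List.foldl_cons, List.foldl_cons, hstep, h2]
    exact ih _ _ _

-- keyless side: A's seen-set loop equals B's nub-by-hash recursion
theorem pvFoldU_eq (rs : List (PySem.Dict String String)) (s : PySem.Set String)
    (u : List (PySem.Dict String String)) :
    (rs.foldl pvStepU (s, u)).2
      = u ++ pvUniqByHash
          ((rs.filter (fun r => (pvRowKey r).isNone)).filter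
            (fun r => !PySem.Set.contains s (pvRowHash r))) := by
  induction rs generalizing s u with
  | nil => simp [pvUniqByHash]
  | cons r rs ih =>
    rw [List.foldl_cons]
    cases hk : pvRowKey r with
    | some k =>
      have h1 : pvStepU (s, u) r = (s, u) := by simp [pvStepU, hk]
      rw [h1, List.filter_cons_of_neg (by simp [hk]), ih]
    | none =>
      by_cases hc : PySem.Set.contains s (pvRowHash r) = true
      · have hmem : pvRowHash r ∈ s := by simpa using hc
        have h1 : pvStepU (s, u) r = (s, u) := by simp [pvStepU, hk, hmem]
        rw [h1, List.filter_cons_of_pos (by simp [hk]),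
          List.filter_cons_of_neg (by simpa using hmem), ih]
      · have hcf : PySem.Set.contains s (pvRowHash r) = false := by simpa using hc
        have hnm : pvRowHash r ∉ s := by simpa using hcf
        have h1 : pvStepU (s, u) r = (PySem.Set.add s (pvRowHash r), u ++ [r]) := by
          simp [pvStepU, hk, hnm]
        have hfs : ∀ L : List (PySem.Dict String String),
            L.filter (fun a => !((PySem.Set.add s (pvRowHash r)).contains (pvRowHash a)))
              = (L.filter (fun a => !(s.contains (pvRowHash a)))).filter
                  (fun a => pvRowHash a != pvRowHash r) := by
          intro L
          rw [List.filter_filter]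
          apply List.filter_congr
          intro x _
          rw [PySem.Set.add_of_not_mem hnm]
          by_cases hx : pvRowHash x = pvRowHash r <;>
            by_cases hxs : pvRowHash x ∈ s <;>
              simp [hx, hxs, bne]
        rw [h1, ih, List.filter_cons_of_pos (by simp [hk]),
          List.filter_cons_of_pos (by simpa using hnm),
          List.append_assoc, List.singleton_append, pvUniqByHash, hfs]

-- keyed side: A's incremental dict equals B's group-extraction recursion
theorem pvFoldK_eq (rs : List (PySem.Dict String String))
    (d : PySem.Dict String (PySem.Dict String String)) (hnd : d.keys.Nodup) :
    (rs.foldl pvStepK d).values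
      = d.items.map (fun kv =>
          (rs.filter (fun r => pvRowKey r == some kv.1)).foldl pvMergeRows kv.2)
        ++ pvMergeGroups (rs.filter (fun r =>
            match pvRowKey r with | some k => !d.contains k | none => false)) := by
  induction rs generalizing d with
  | nil => simp [pvMergeGroups, PySem.Dict.values]
  | cons r rs ih =>
    rw [List.foldl_cons]
    cases hk : pvRowKey r with
    | none =>
      have h1 : pvStepK d r = d := by simp [pvStepK, hk]
      rw [h1, ih d hnd]
      congr 1
      · apply List.map_congr_left
        intro kv _
        rw [List.filter_cons_of_neg (by simp [hk])]
      · rw [List.filter_cons_of_neg (by simp [hk])]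
    | some k0 =>
      cases hg : d.get? k0 with
      | some prev =>
        have hcont : d.contains k0 = true := by
          rw [PySem.Dict.contains_eq_isSome_get?, hg]; rfl
        have h1 : pvStepK d r = d.insert k0 (pvMergeRows prev r) := by
          simp [pvStepK, hk, hg]
        have hnd' : (d.insert k0 (pvMergeRows prev r)).keys.Nodup :=
          PySem.Dict.nodup_keys_insert _ _ _ hnd
        rw [h1, ih _ hnd']
        congr 1
        · rw [PySem.Dict.items_insert_of_contains _ _ hcont, List.map_map]
          apply List.map_congr_left
          intro kv hkv
          by_cases hkv1 : kv.1 = k0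
          · have hget : d.get? kv.1 = some kv.2 := PySem.Dict.get?_of_mem_items _ hkv hnd
            rw [hkv1] at hget
            rw [hg] at hget
            have hprev : kv.2 = prev := by injection hget with h; exact h.symm
            have hbeq : (kv.1 == k0) = true := by simp [hkv1]
            simp only [Function.comp, hbeq, if_pos]
            rw [List.filter_cons_of_pos (by simp [hk, hkv1]), List.foldl_cons, hprev, hkv1]
          · have hbeq : (kv.1 == k0) = false := by simp [hkv1]
            simp only [Function.comp, hbeq, Bool.false_eq_true, if_false]
            rw [List.filter_cons_of_neg (by simp [hk]; exact fun h => (hkv1 h.symm).elim)]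
        · rw [List.filter_cons_of_neg (by simp [hk, hcont])]
          congr 1
          apply List.filter_congr
          intro x _
          cases hx : pvRowKey x with
          | none => rfl
          | some kx =>
            simp only [PySem.Dict.contains_insert]
            by_cases hxk : kx = k0
            · simp [hxk, hcont]
            · simp [hxk]
      | none =>
        have hcont : d.contains k0 = false := by
          rw [PySem.Dict.contains_eq_isSome_get?, hg]; rfl
        have h1 : pvStepK d r = d.insert k0 r := by simp [pvStepK, hk, hg]
        have hnd' : (d.insert k0 r).keys.Nodup :=
          PySem.Dict.nodup_keys_insert _ _ _ hnd
        have hk0mem : k0 ∉ d.keys := by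
          intro hmem
          rw [(PySem.Dict.contains_iff_mem_keys _ _).2 hmem] at hcont
          cases hcont
        rw [h1, ih _ hnd', PySem.Dict.items_insert_of_not_contains _ _ hcont,
          List.map_append]
        rw [List.filter_cons_of_pos (by simp [hk, hcont])]
        rw [pvMergeGroups]
        rw [List.append_assoc]
        congr 1
        · -- surviving entries of d: r never joins their groups
          apply List.map_congr_left
          intro kv hkv
          have hne : kv.1 ≠ k0 := by
            intro he
            exact hk0mem (he ▸ PySem.Dict.mem_keys_of_mem_items _ hkv)
          rw [List.filter_cons_of_neg (by simp [hk]; exact fun h => (hne h.symm).elim)]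
        · -- the fresh group: head fold and recursion complement
          simp only [List.map_cons, List.map_nil, List.singleton_append]
          congr 1
          · rw [hk, PySem.List.foldl_if_eq_foldl_filter, List.filter_filter]
            congr 1
            apply List.filter_congr
            intro x _
            cases hx : pvRowKey x with
            | none => rfl
            | some kx =>
              by_cases hxk : kx = k0
              · simp [hxk, hcont]
              · simp [hxk]
          · congr 1
            rw [hk, List.filter_filter]
            apply List.filter_congr
            intro x _
            cases hx : pvRowKey x with
            | none => rfl
            | some kx =>
              simp only [PySem.Dict.contains_insert]
              by_cases hxk : kx = k0
              · simp [hxk]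
              · simp [bne]

-- ===== VERDICT (by name: the statement is the Claim_ definition above) =====
theorem dedup_per_vehicle_list_py_spec : Claim_equal_dedup_per_vehicle_list_py := by
  intro per_vehicle _
  unfold Spec_dedup_per_vehicle_list_py dedup_per_vehicle_list_py dedup_per_vehicle_list_py_alt
  rw [pvFoldA_map, pvFoldA_split]
  unfold pvFinishA
  rw [pvFoldU_eq, pvFoldK_eq _ _ (by simp [PySem.Dict.empty, PySem.Dict.keys])]
  simp only [PySem.Dict.empty, List.map_nil, List.nil_append]
  congr 2
  · congr 1
    exact List.filter_eq_self.mpr (fun x _ => by rfl)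
  · congr 1
    apply List.filter_congr
    intro x _
    cases hx : pvRowKey x with
    | none => rfl
    | some k => simp
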